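-- pv_equiv track=rewrite | github.com/nanduanil/CodingExercise | HackerRank/Competition/RookieRank/height-and-total-height-of-a-bst.py | heightAndTotalHeight
-- ===== SOURCE A (Python) =====
-- class node:
--   def __init__(self, data):
--       self.data = data
--       self.left = None
--       self.right = None
--
-- def insertBST(treeNode,value):
--     if(treeNode.data > value):
--         if(not(treeNode.left)):
--             treeNode.left = node(value)
--         else:
--             insertBST(treeNode.left,value)
--     elif(treeNode.data < value):
--         if(not(treeNode.right)):
--             treeNode.right = node(value)
--         else:
--             insertBST(treeNode.right,value)
--
-- def calculateHeight(treeNode,heightDict):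
--     if(treeNode.left):
--         calculateHeight(treeNode.left,heightDict)
--         if(heightDict[treeNode.left.data] + 1 > heightDict[treeNode.data]):
--             heightDict[treeNode.data] = heightDict[treeNode.left.data] + 1
--     if(treeNode.right):
--         calculateHeight(treeNode.right,heightDict)
--         if(heightDict[treeNode.right.data] + 1 > heightDict[treeNode.data]):
--             heightDict[treeNode.data] = heightDict[treeNode.right.data] + 1
--
-- def heightAndTotalHeight(arr):
--     # Write your code here.
--     rootTree = node(arr[0])
--     heightDict = {}
--     heightDict[arr[0]] = 0
--     for insertNum in arr[1:]:
--         insertBST(rootTree,insertNum)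
--         heightDict[insertNum] = 0
--     calculateHeight(rootTree,heightDict)
--
--     sumOfHeights = 0
--     for i in heightDict.items():
--         sumOfHeights = sumOfHeights + i[1]
--
--     return [heightDict[arr[0]],sumOfHeights]
-- ===== SOURCE B (Python) =====
-- def _insert(t, v):
--     # immutable BST insert on (value, left, right) tuples; None = empty
--     if t is None:
--         return (v, None, None)
--     d, l, r = t
--     if v < d:
--         return (d, _insert(l, v), r)
--     if v > d:
--         return (d, l, _insert(r, v))
--     return t
--
-- def _hs(t):
--     # returns (height, sum of heights of all nodes); empty tree has height -1
--     if t is None: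
--         return (-1, 0)
--     hl, sl = _hs(t[1])
--     hr, sr = _hs(t[2])
--     h = max(hl, hr) + 1
--     return (h, sl + sr + h)
--
-- def heightAndTotalHeight(arr):
--     t = None
--     for x in arr:
--         t = _insert(t, x)
--     h, s = _hs(t)
--     return [h, s]
-- ===== Notes on version B (the rewrite author's own statement) =====
-- stated objective: simpler
-- what changed: B replaces A's mutable node class + value-keyed height dictionary + separate summation loop with an immutable-tuple BST insert and one post-order traversal that returns (height, sum of heights) as a pair.
import Mathlib
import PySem

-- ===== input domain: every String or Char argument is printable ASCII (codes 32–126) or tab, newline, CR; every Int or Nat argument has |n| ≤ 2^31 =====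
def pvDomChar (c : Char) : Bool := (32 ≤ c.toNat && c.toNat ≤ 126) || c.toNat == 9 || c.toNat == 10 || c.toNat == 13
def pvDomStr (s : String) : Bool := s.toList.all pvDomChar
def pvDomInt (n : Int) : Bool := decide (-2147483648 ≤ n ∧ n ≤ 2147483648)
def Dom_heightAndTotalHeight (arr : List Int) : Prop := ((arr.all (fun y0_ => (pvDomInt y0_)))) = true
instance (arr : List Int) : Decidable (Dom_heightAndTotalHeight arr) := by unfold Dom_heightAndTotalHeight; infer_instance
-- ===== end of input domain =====

-- B replaces A's mutable node class + value-keyed height dict + separate summation loop by an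
-- immutable BST insert and ONE post-order traversal returning (height, sum of heights); objective: simpler.

-- Binary tree with Int values (shared shape for both ports; each port builds and uses it its own way)
inductive PVTree where
  | nil : PVTree
  | node : Int → PVTree → PVTree → PVTree
deriving DecidableEq, Repr

-- ===== PORT A =====
-- insertBST: A mutates child pointers; ported as a recursion returning the updated tree.
-- A never calls insertBST on None, so the nil case is unreachable (returned unchanged).
def insertA (t : PVTree) (v : Int) : PVTree :=
  match t with
  | .nil => .nil
  | .node d l r =>
    if d > v then
      match l with
      | .nil => .node d (.node v .nil .nil) r
      | .node _ _ _ => .node d (insertA l v) r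
    else if d < v then
      match r with
      | .nil => .node d l (.node v .nil .nil)
      | .node _ _ _ => .node d l (insertA r v)
    else .node d l r

-- calculateHeight: mutates heightDict; ported as a dict-transforming recursion.
-- Python reads heightDict[x] (KeyError if absent); every value read is a key inserted in
-- heightAndTotalHeight before the call, so getD _ 0 is exact here.
def calcA (t : PVTree) (hd : PySem.Dict Int Int) : PySem.Dict Int Int :=
  match t with
  | .nil => hd
  | .node d l r =>
    let hd1 :=
      match l with
      | .nil => hd
      | .node ld _ _ =>
        let h' := calcA l hd
        if h'.getD ld 0 + 1 > h'.getD d 0 then h'.insert d (h'.getD ld 0 + 1) else h'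
    match r with
    | .nil => hd1
    | .node rd _ _ =>
      let h' := calcA r hd1
      if h'.getD rd 0 + 1 > h'.getD d 0 then h'.insert d (h'.getD rd 0 + 1) else h'

def heightAndTotalHeight (arr : List Int) : List Int :=
  match arr with
  | [] => []   -- Python raises IndexError on arr[0]; excluded by Pre_
  | a0 :: rest =>
    let st := rest.foldl
      (fun (st : PVTree × PySem.Dict Int Int) x => (insertA st.1 x, st.2.insert x 0))
      (PVTree.node a0 .nil .nil, (PySem.Dict.empty).insert a0 0)
    let hd := calcA st.1 st.2
    let s := hd.items.foldl (fun acc i => acc + i.2) 0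
    [hd.getD a0 0, s]

-- ===== PORT B =====
def insertB (t : PVTree) (v : Int) : PVTree :=
  match t with
  | .nil => .node v .nil .nil
  | .node d l r =>
    if v < d then .node d (insertB l v) r
    else if v > d then .node d l (insertB r v)
    else .node d l r

-- one post-order pass: (height, sum of heights); empty tree has height -1
def hsB (t : PVTree) : Int × Int :=
  match t with
  | .nil => (-1, 0)
  | .node _ l r =>
    let p := hsB l
    let q := hsB r
    let h := max p.1 q.1 + 1
    (h, p.2 + q.2 + h)

def heightAndTotalHeight_alt (arr : List Int) : List Int :=
  let t := arr.foldl insertB .nil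
  let p := hsB t
  [p.1, p.2]

-- ===== PRECONDITION & SPEC =====
-- Pre_ excludes only the empty list, on which Python A raises IndexError (arr[0]).
def Pre_heightAndTotalHeight (arr : List Int) : Prop := arr ≠ []
instance (arr : List Int) : Decidable (Pre_heightAndTotalHeight arr) := by unfold Pre_heightAndTotalHeight; infer_instance
def pvWitness_heightAndTotalHeight : List Int := [2, 1, 3]

def Spec_heightAndTotalHeight (arr : List Int) (out : List Int) : Prop := out = heightAndTotalHeight_alt arr
instance (arr : List Int) (out : List Int) : Decidable (Spec_heightAndTotalHeight arr out) := by unfold Spec_heightAndTotalHeight; infer_instance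

-- ===== CLAIM (what is proved, stated in full; the proofs are below) =====
def Claim_equal_heightAndTotalHeight : Prop := ∀ (arr : List Int), Dom_heightAndTotalHeight arr → Pre_heightAndTotalHeight arr → Spec_heightAndTotalHeight arr (heightAndTotalHeight arr)


-- ===== LEMMAS AND PROOFS =====

-- values of a tree, in order
def tvals : PVTree → List Int
  | .nil => []
  | .node d l r => tvals l ++ d :: tvals r

-- binary-search-tree invariant
def isBST : PVTree → Prop
  | .nil => True
  | .node d l r => (∀ x ∈ tvals l, x < d) ∧ (∀ x ∈ tvals r, d < x) ∧ isBST l ∧ isBST r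

-- height of the node holding value k (0 if absent)
def hAt : PVTree → Int → Int
  | .nil, _ => 0
  | .node d l r, k => if k < d then hAt l k else if d < k then hAt r k else (hsB (.node d l r)).1

lemma hsB_fst_ge (t : PVTree) : -1 ≤ (hsB t).1 := by
  cases t with
  | nil => simp [hsB]
  | node d l r =>
    have := le_max_left (hsB l).1 (hsB r).1
    have := hsB_fst_ge l
    simp only [hsB]; omega

lemma hAt_root (d : Int) (l r : PVTree) : hAt (.node d l r) d = (hsB (.node d l r)).1 := by
  simp [hAt]

lemma mem_tvals_insertB (t : PVTree) (x v : Int) :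
    v ∈ tvals (insertB t x) ↔ v = x ∨ v ∈ tvals t := by
  induction t with
  | nil => simp [insertB, tvals]
  | node d l r ihl ihr =>
    simp only [insertB]
    split_ifs with h1 h2
    · simp only [tvals, List.mem_append, List.mem_cons, ihl]; tauto
    · simp only [tvals, List.mem_append, List.mem_cons, ihr]; tauto
    · have hxd : x = d := by omega
      subst hxd
      simp only [tvals, List.mem_append, List.mem_cons]
      tauto

lemma isBST_insertB (t : PVTree) (x : Int) (h : isBST t) : isBST (insertB t x) := by
  induction t with
  | nil => simp [insertB, isBST, tvals]
  | node d l r ihl ihr =>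
    obtain ⟨hl, hr, bl, br⟩ := h
    simp only [insertB]
    split_ifs with h1 h2
    · refine ⟨?_, hr, ihl bl, br⟩
      intro y hy
      rcases (mem_tvals_insertB l x y).1 hy with h | h
      · omega
      · exact hl y h
    · refine ⟨hl, ?_, bl, ihr br⟩
      intro y hy
      rcases (mem_tvals_insertB r x y).1 hy with h | h
      · omega
      · exact hr y h
    · exact ⟨hl, hr, bl, br⟩

lemma insertB_ne_nil (t : PVTree) (v : Int) : insertB t v ≠ .nil := by
  cases t with
  | nil => simp [insertB]
  | node d l r => simp only [insertB]; split_ifs <;> simp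

lemma insertA_eq_insertB (t : PVTree) (v : Int) (h : t ≠ .nil) : insertA t v = insertB t v := by
  induction t with
  | nil => exact absurd rfl h
  | node d l r ihl ihr =>
    simp only [insertA, insertB]
    by_cases h1 : v < d
    · have : d > v := h1
      simp only [if_pos this]
      cases l with
      | nil => simp [insertB]
      | node ld ll lr => rw [ihl (by simp)]
    · by_cases h2 : v > d
      · have hnd : ¬ d > v := by omega
        simp only [if_neg hnd, if_pos (show d < v from h2)]
        cases r with
        | nil => simp [insertB]
        | node rd rl rr => rw [ihr (by simp)]
      · have hnd : ¬ d > v := by omega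
        have hnd2 : ¬ d < v := by omega
        simp [h1, h2]

lemma foldl_insertA_eq (l : List Int) (t : PVTree) (h : t ≠ .nil) :
    l.foldl insertA t = l.foldl insertB t := by
  induction l generalizing t with
  | nil => rfl
  | cons x xs ih =>
    simp only [List.foldl_cons]
    rw [insertA_eq_insertB t x h]
    exact ih _ (insertB_ne_nil t x)

-- root value of the running tree never changes
def rootv : PVTree → Int
  | .nil => 0
  | .node d _ _ => d

lemma foldl_insertB_struct (l : List Int) (t : PVTree) (h : t ≠ .nil) :
    (l.foldl insertB t) ≠ .nil ∧ rootv (l.foldl insertB t) = rootv t := by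
  induction l generalizing t with
  | nil => exact ⟨h, rfl⟩
  | cons x xs ih =>
    simp only [List.foldl_cons]
    refine (ih _ (insertB_ne_nil t x)).imp id (fun h2 => h2.trans ?_)
    cases t with
    | nil => exact absurd rfl h
    | node d lt rt => simp only [insertB]; split_ifs <;> rfl

lemma mem_tvals_foldl (l : List Int) (t : PVTree) (v : Int) :
    v ∈ tvals (l.foldl insertB t) ↔ v ∈ tvals t ∨ v ∈ l := by
  induction l generalizing t with
  | nil => simp
  | cons x xs ih =>
    simp only [List.foldl_cons, ih, mem_tvals_insertB, List.mem_cons]; tauto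

lemma isBST_foldl (l : List Int) (t : PVTree) (h : isBST t) : isBST (l.foldl insertB t) := by
  induction l generalizing t with
  | nil => exact h
  | cons x xs ih => exact ih _ (isBST_insertB t x h)

lemma nodup_tvals (t : PVTree) (h : isBST t) : (tvals t).Nodup := by
  induction t with
  | nil => exact List.nodup_nil
  | node d l r ihl ihr =>
    obtain ⟨hl, hr, bl, br⟩ := h
    simp only [tvals, List.nodup_append, List.nodup_cons]
    refine ⟨ihl bl, ⟨fun hm => absurd (hr d hm) (by omega), ihr br⟩, ?_⟩
    intro a ha b hb
    rcases List.mem_cons.mp hb with rfl | hb2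
    · have := hl a ha; omega
    · have := hl a ha; have := hr b hb2; omega

-- one child step of calculateHeight (the two branches of calcA have this common shape)
def stepA (d : Int) (c : PVTree) (hd : PySem.Dict Int Int) : PySem.Dict Int Int :=
  match c with
  | .nil => hd
  | .node cd _ _ =>
    let h' := calcA c hd
    if h'.getD cd 0 + 1 > h'.getD d 0 then h'.insert d (h'.getD cd 0 + 1) else h'

lemma calcA_node (d : Int) (l r : PVTree) (hd : PySem.Dict Int Int) :
    calcA (.node d l r) hd = stepA d r (stepA d l hd) := by
  cases l <;> cases r <;> rfl

lemma sum_hAt (t : PVTree) (h : isBST t) : ((tvals t).map (hAt t)).sum = (hsB t).2 := by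
  induction t with
  | nil => simp [tvals, hsB]
  | node d l r ihl ihr =>
    obtain ⟨hl, hr, bl, br⟩ := h
    have el : (tvals l).map (hAt (.node d l r)) = (tvals l).map (hAt l) := by
      apply List.map_congr_left
      intro k hk
      have : k < d := hl k hk
      simp [hAt, this]
    have er : (tvals r).map (hAt (.node d l r)) = (tvals r).map (hAt r) := by
      apply List.map_congr_left
      intro k hk
      have h1 : d < k := hr k hk
      have h2 : ¬ k < d := by omega
      simp [hAt, h1, h2]
    simp only [tvals, List.map_append, List.map_cons, List.sum_append, List.sum_cons, el, er,
      ihl bl, ihr br, hAt_root]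
    simp only [hsB]
    ring

-- what one child branch of calculateHeight does to the dict (ih = the induction hypothesis for c)
lemma stepA_spec (d : Int) (c : PVTree) (dd : PySem.Dict Int Int) (v0 : Int)
    (hdc : d ∉ tvals c) (hgd : dd.get? d = some v0) (hv0 : 0 ≤ v0)
    (ih : (calcA c dd).keys = dd.keys ∧
      ∀ k, (calcA c dd).get? k = if k ∈ tvals c then some (hAt c k) else dd.get? k) :
    (stepA d c dd).keys = dd.keys ∧
      ∀ k, (stepA d c dd).get? k =
        if k = d then some (max v0 ((hsB c).1 + 1))
        else if k ∈ tvals c then some (hAt c k) else dd.get? k := by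
  cases c with
  | nil =>
    refine ⟨rfl, fun k => ?_⟩
    by_cases hk : k = d
    · subst hk
      have : max v0 ((hsB PVTree.nil).1 + 1) = v0 := by simp only [hsB]; omega
      simpa [stepA, this] using hgd
    · simp [stepA, tvals, hk]
  | node cd cl cr =>
    obtain ⟨hkeys, hget⟩ := ih
    have hcd_mem : cd ∈ tvals (PVTree.node cd cl cr) := by simp [tvals]
    have hgcd : (calcA (.node cd cl cr) dd).get? cd = some (hAt (.node cd cl cr) cd) := by
      rw [hget cd, if_pos hcd_mem]
    have hgdd : (calcA (.node cd cl cr) dd).get? d = some v0 := by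
      rw [hget d, if_neg hdc]; exact hgd
    have e1 : (calcA (.node cd cl cr) dd).getD cd 0 = (hsB (.node cd cl cr)).1 := by
      rw [PySem.Dict.getD_of_get?_eq_some _ _ hgcd, hAt_root]
    have e2 : (calcA (.node cd cl cr) dd).getD d 0 = v0 :=
      PySem.Dict.getD_of_get?_eq_some _ _ hgdd
    have hcont : (calcA (.node cd cl cr) dd).contains d = true := by
      rw [PySem.Dict.contains_eq_isSome_get?, hgdd]; rfl
    simp only [stepA, e1, e2]
    by_cases hgt : (hsB (.node cd cl cr)).1 + 1 > v0
    · rw [if_pos hgt]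
      refine ⟨by rw [PySem.Dict.keys_insert_of_contains _ _ hcont, hkeys], fun k => ?_⟩
      rw [PySem.Dict.get?_insert]
      by_cases hk : k = d
      · subst hk
        rw [if_pos rfl, if_pos rfl]
        congr 1; omega
      · rw [if_neg hk, if_neg hk]; exact hget k
    · rw [if_neg hgt]
      refine ⟨hkeys, fun k => ?_⟩
      by_cases hk : k = d
      · subst hk
        rw [if_pos rfl, hgdd]
        congr 1; omega
      · rw [if_neg hk]; exact hget k

-- the induction invariant for calcA: keys unchanged, every tree value mapped to its height
lemma calcA_get : ∀ (t : PVTree) (hd : PySem.Dict Int Int), isBST t →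
    (∀ k ∈ tvals t, hd.get? k = some 0) →
    (calcA t hd).keys = hd.keys ∧
      ∀ k, (calcA t hd).get? k =
        if k ∈ tvals t then some (hAt t k) else hd.get? k := by
  intro t
  induction t with
  | nil => intro hd _ _; simp [calcA, tvals]
  | node d l r ihl ihr =>
    intro hd hb h0
    obtain ⟨hbl, hbr, bl, br⟩ := hb
    have hdl : d ∉ tvals l := fun hmem => absurd (hbl d hmem) (by omega)
    have hdr : d ∉ tvals r := fun hmem => absurd (hbr d hmem) (by omega)
    have hd0 : hd.get? d = some 0 := h0 d (by simp [tvals])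
    have h0l : ∀ k ∈ tvals l, hd.get? k = some 0 := fun k hk => h0 k (by simp [tvals, hk])
    obtain ⟨keysL, getL⟩ :=
      stepA_spec d l hd 0 hdl hd0 le_rfl (ihl hd bl h0l)
    have hgeL := hsB_fst_ge l
    have hL1 : max 0 ((hsB l).1 + 1) = (hsB l).1 + 1 := by omega
    have h0r : ∀ k ∈ tvals r, (stepA d l hd).get? k = some 0 := by
      intro k hk
      have hkd : k ≠ d := fun he => hdr (he ▸ hk)
      have hkl : k ∉ tvals l := by
        intro hx; have := hbl k hx; have := hbr k hk; omega
      rw [getL k, if_neg hkd, if_neg hkl]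
      exact h0 k (by simp [tvals, hk])
    have hMd : (stepA d l hd).get? d = some ((hsB l).1 + 1) := by
      rw [getL d, if_pos rfl, hL1]
    obtain ⟨keysR, getR⟩ :=
      stepA_spec d r (stepA d l hd) ((hsB l).1 + 1) hdr hMd (by omega)
        (ihr (stepA d l hd) br h0r)
    rw [calcA_node]
    refine ⟨by rw [keysR, keysL], fun k => ?_⟩
    rw [getR k]
    by_cases hk : k = d
    · subst hk
      rw [if_pos rfl, if_pos (by simp [tvals])]
      rw [hAt_root]
      congr 1
      simp only [hsB]
      omega
    · rw [if_neg hk]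
      by_cases hkr : k ∈ tvals r
      · have h1 : d < k := hbr k hkr
        have h2 : ¬ k < d := by omega
        rw [if_pos hkr, if_pos (by simp [tvals, hkr])]
        simp [hAt, h1, h2]
      · rw [if_neg hkr, getL k, if_neg hk]
        by_cases hkl : k ∈ tvals l
        · have h1 : k < d := hbl k hkl
          rw [if_pos hkl, if_pos (by simp [tvals, hkl])]
          simp [hAt, h1]
        · rw [if_neg hkl, if_neg (by simp [tvals, hk, hkl, hkr])]

-- get? of the constant-zero insertion loop
lemma get?_foldl_insert_zero (l : List Int) (d : PySem.Dict Int Int) (k : Int) :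
    (l.foldl (fun d x => d.insert x 0) d).get? k = if k ∈ l then some 0 else d.get? k := by
  induction l generalizing d with
  | nil => simp
  | cons x xs ih =>
    simp only [List.foldl_cons, ih, List.mem_cons]
    by_cases hx : k ∈ xs
    · simp [hx]
    · rw [if_neg hx, PySem.Dict.get?_insert]
      by_cases hk : k = x <;> simp [hk, hx]

-- sum of dict values as a sum over its keys
lemma items_foldl_sum (d : PySem.Dict Int Int) (h : d.keys.Nodup) :
    d.items.foldl (fun acc i => acc + i.2) 0 = (d.keys.map (fun k => d.getD k 0)).sum := by
  rw [PySem.List.foldl_add]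
  have : d.keys.map (fun k => d.getD k 0) = d.items.map (fun i => i.2) := by
    simp only [PySem.Dict.keys, List.map_map]
    apply List.map_congr_left
    intro p hp
    exact PySem.Dict.getD_of_mem_items d (by simpa using hp) h 0
  rw [this]
  simp

-- ===== VERDICT (by name: the statement is the Claim_ definition above) =====
theorem heightAndTotalHeight_spec : Claim_equal_heightAndTotalHeight := by
  intro arr _ hpre
  unfold Spec_heightAndTotalHeight
  match arr with
  | [] => exact absurd rfl hpre
  | a0 :: rest =>
    simp only [heightAndTotalHeight, heightAndTotalHeight_alt, List.foldl_cons]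
    have hT0 : insertB .nil a0 = PVTree.node a0 .nil .nil := rfl
    rw [hT0]
    have hsplit := PySem.List.foldl_prod_mk insertA
      (fun (d : PySem.Dict Int Int) x => d.insert x 0) rest
      (PVTree.node a0 .nil .nil) ((PySem.Dict.empty).insert a0 0)
    rw [hsplit]
    dsimp only
    rw [foldl_insertA_eq rest _ (by simp)]
    set T := rest.foldl insertB (PVTree.node a0 .nil .nil) with hTdef
    set D0 := rest.foldl (fun (d : PySem.Dict Int Int) x => d.insert x 0)
      ((PySem.Dict.empty).insert a0 0) with hD0def
    -- structure of T
    obtain ⟨hTne, hTroot⟩ := foldl_insertB_struct rest (PVTree.node a0 .nil .nil) (by simp)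
    rw [← hTdef] at hTne hTroot
    have hTb : isBST T := isBST_foldl rest _ (by simp [isBST, tvals])
    have hmemT : ∀ v, v ∈ tvals T ↔ v = a0 ∨ v ∈ rest := by
      intro v; rw [hTdef, mem_tvals_foldl]; simp [tvals]
    -- initial dict
    have hD0get : ∀ k, D0.get? k = if k = a0 ∨ k ∈ rest then some 0 else none := by
      intro k
      rw [hD0def, get?_foldl_insert_zero]
      by_cases hk : k ∈ rest
      · simp [hk]
      · rw [if_neg hk, PySem.Dict.get?_insert]
        by_cases hka : k = a0 <;> simp [hka, hk, PySem.Dict.get?_empty]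
    have hD0nodup : D0.keys.Nodup := by
      rw [hD0def]
      exact PySem.Dict.nodup_keys_foldl_insert rest (fun _ _ => 0) _
        (by rw [PySem.Dict.keys_insert_of_not_contains _ _ (by simp), PySem.Dict.keys_empty]
            simp)
    obtain ⟨hFkeys, hFget⟩ := calcA_get T D0 hTb
      (fun k hk => by rw [hD0get k, if_pos ((hmemT k).1 hk)])
    -- root entry
    have ha0T : a0 ∈ tvals T := (hmemT a0).2 (Or.inl rfl)
    have hroot : (calcA T D0).getD a0 0 = (hsB T).1 := by
      have := hFget a0
      rw [if_pos ha0T] at this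
      rw [PySem.Dict.getD_of_get?_eq_some _ _ this]
      obtain ⟨d, l, r, hTe⟩ : ∃ d l r, T = PVTree.node d l r := by
        cases hTc : T with
        | nil => exact absurd hTc hTne
        | node d l r => exact ⟨d, l, r, rfl⟩
      have hda : d = a0 := by rw [hTe] at hTroot; simpa [rootv] using hTroot
      rw [hTe, hda, hAt_root]
    -- the sum
    have hFnodup : (calcA T D0).keys.Nodup := by rw [hFkeys]; exact hD0nodup
    have hkeysmem : ∀ k, k ∈ (calcA T D0).keys ↔ k ∈ tvals T := by
      intro k
      rw [← PySem.Dict.contains_iff_mem_keys, PySem.Dict.contains_eq_isSome_get?, hFget k]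
      by_cases hk : k ∈ tvals T
      · simp [hk]
      · rw [if_neg hk, hD0get k, if_neg (fun hc => hk ((hmemT k).2 hc))]
        simp [hk]
    have hperm : (calcA T D0).keys.Perm (tvals T) :=
      (List.perm_ext_iff_of_nodup hFnodup (nodup_tvals T hTb)).2 hkeysmem
    have hsum : (calcA T D0).items.foldl (fun acc i => acc + i.2) 0 = (hsB T).2 := by
      rw [items_foldl_sum _ hFnodup]
      have hmapeq : (calcA T D0).keys.map (fun k => (calcA T D0).getD k 0)
          = (calcA T D0).keys.map (hAt T) := by
        apply List.map_congr_left
        intro k hk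
        have hkt : k ∈ tvals T := (hkeysmem k).1 hk
        have := hFget k
        rw [if_pos hkt] at this
        exact PySem.Dict.getD_of_get?_eq_some _ _ this
      rw [hmapeq, (hperm.map (hAt T)).sum_eq, sum_hAt T hTb]
    rw [hroot, hsum]
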